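-- pv_equiv track=rewrite | github.com/PeterCcT/A-start-algo | main.py | get_maze_beginning_and_end
-- ===== SOURCE A (Python) =====
-- Maze = list[list[int]]
--
-- NodeCoord = tuple[int, int]
--
-- MAZE_BEGINNING = 'S'
--
-- MAZE_END = 'E'
--
-- def get_maze_beginning_and_end(maze: Maze) -> tuple[NodeCoord, NodeCoord]:
--     beginning_coords = None
--     end_coords = None
--
--     for row in range(len(maze)):
--         for col in range(len(maze[row])):
--             if maze[row][col] == MAZE_BEGINNING:
--                 beginning_coords = (row, col)
--             if maze[row][col] == MAZE_END:
--                 end_coords = (row, col)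
--
--     return beginning_coords, end_coords
-- ===== SOURCE B (Python) =====
-- MAZE_BEGINNING = 'S'
-- MAZE_END = 'E'
--
-- def get_maze_beginning_and_end(maze):
--     # Scan backwards (last row to first, last column to first): the first hit in
--     # reverse order is the last occurrence in forward order; stop as soon as both
--     # coordinates are found.
--     beginning_coords = None
--     end_coords = None
--     for row, cells in reversed(list(enumerate(maze))):
--         for col, value in reversed(list(enumerate(cells))):
--             if beginning_coords is None and value == MAZE_BEGINNING:
--                 beginning_coords = (row, col)
--             if end_coords is None and value == MAZE_END:
--                 end_coords = (row, col)
--             if beginning_coords is not None and end_coords is not None: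
--                 return beginning_coords, end_coords
--     return beginning_coords, end_coords
-- ===== Notes on version B (the rewrite author's own statement) =====
-- stated objective: alternative
-- what changed: B traverses the grid in reverse row-major order, taking the first reverse hit of 'S'/'E' (which is the last forward occurrence) and returning early once both are found, instead of A's full forward scan that keeps overwriting both coordinates.
import Mathlib
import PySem

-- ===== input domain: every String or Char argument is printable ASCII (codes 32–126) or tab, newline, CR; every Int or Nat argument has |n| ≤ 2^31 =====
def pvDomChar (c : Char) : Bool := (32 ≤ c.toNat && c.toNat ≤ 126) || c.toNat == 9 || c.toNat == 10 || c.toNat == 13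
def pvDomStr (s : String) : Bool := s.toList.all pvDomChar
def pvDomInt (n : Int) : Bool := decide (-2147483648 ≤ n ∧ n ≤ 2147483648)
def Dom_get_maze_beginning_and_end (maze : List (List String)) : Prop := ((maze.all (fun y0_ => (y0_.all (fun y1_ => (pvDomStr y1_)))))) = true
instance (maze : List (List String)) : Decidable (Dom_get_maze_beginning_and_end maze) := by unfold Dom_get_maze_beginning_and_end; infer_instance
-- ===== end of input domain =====

-- B traverses the grid in reverse row-major order, taking the first reverse hit of 'S'/'E'
-- (= the last forward occurrence) and returning early once both are found; A scans the whole
-- grid forwards, overwriting both coordinates. Objective: alternative decomposition.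

-- ===== PORT A =====
-- loop body of A's inner loop: overwrite on every match
def stepA (row col : Int) (v : String) (st : (Option (Int × Int)) × (Option (Int × Int))) :
    (Option (Int × Int)) × (Option (Int × Int)) :=
  let st1 := if v = "S" then (some (row, col), st.2) else st
  if v = "E" then (st1.1, some (row, col)) else st1

def get_maze_beginning_and_end (maze : List (List String)) :
    (Option (Int × Int)) × (Option (Int × Int)) :=
  maze.zipIdx.foldl
    (fun st rr => rr.1.zipIdx.foldl (fun st cv => stepA (rr.2 : Int) (cv.2 : Int) cv.1 st) st)
    (none, none)

-- ===== PORT B =====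
-- loop body of B's inner loop: write only if still None
def stepB (row col : Int) (v : String) (st : (Option (Int × Int)) × (Option (Int × Int))) :
    (Option (Int × Int)) × (Option (Int × Int)) :=
  (if st.1 = none ∧ v = "S" then some (row, col) else st.1,
   if st.2 = none ∧ v = "E" then some (row, col) else st.2)

-- inner loop over the reversed, enumerated row; Bool = early `return` taken
def bCols (row : Int) : List (String × Nat) → (Option (Int × Int)) × (Option (Int × Int)) →
    ((Option (Int × Int)) × (Option (Int × Int))) × Bool
  | [], st => (st, false)
  | cv :: rest, st =>
    let st' := stepB row (cv.2 : Int) cv.1 st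
    if st'.1 ≠ none ∧ st'.2 ≠ none then (st', true) else bCols row rest st'

-- outer loop over the reversed, enumerated rows
def bRows : List (List String × Nat) → (Option (Int × Int)) × (Option (Int × Int)) →
    (Option (Int × Int)) × (Option (Int × Int))
  | [], st => st
  | rr :: rest, st =>
    let r := bCols (rr.2 : Int) rr.1.zipIdx.reverse st
    if r.2 then r.1 else bRows rest r.1

def get_maze_beginning_and_end_alt (maze : List (List String)) :
    (Option (Int × Int)) × (Option (Int × Int)) :=
  bRows maze.zipIdx.reverse (none, none)

-- ===== PRECONDITION & SPEC =====
def Spec_get_maze_beginning_and_end (maze : List (List String)) (out : (Option (Int × Int)) × (Option (Int × Int))) : Prop := out = get_maze_beginning_and_end_alt maze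
instance (maze : List (List String)) (out : (Option (Int × Int)) × (Option (Int × Int))) : Decidable (Spec_get_maze_beginning_and_end maze out) := by unfold Spec_get_maze_beginning_and_end; infer_instance

-- ===== CLAIM (what is proved, stated in full; the proofs are below) =====
def Claim_equal_get_maze_beginning_and_end : Prop := ∀ (maze : List (List String)), Dom_get_maze_beginning_and_end maze → Spec_get_maze_beginning_and_end maze (get_maze_beginning_and_end maze)

-- ===== LEMMAS AND PROOFS =====

-- row-major list of (row, col, value) cells
def cells (maze : List (List String)) : List (Int × Int × String) :=
  maze.zipIdx.flatMap (fun rr => rr.1.zipIdx.map (fun cv => ((rr.2 : Int), (cv.2 : Int), cv.1)))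

def stepA' (st : (Option (Int × Int)) × (Option (Int × Int))) (c : Int × Int × String) :
    (Option (Int × Int)) × (Option (Int × Int)) := stepA c.1 c.2.1 c.2.2 st
def stepB' (st : (Option (Int × Int)) × (Option (Int × Int))) (c : Int × Int × String) :
    (Option (Int × Int)) × (Option (Int × Int)) := stepB c.1 c.2.1 c.2.2 st

-- first S / first E in a cell list
def fS (l : List (Int × Int × String)) : Option (Int × Int) :=
  (l.find? (fun c => c.2.2 == "S")).map (fun c => (c.1, c.2.1))
def fE (l : List (Int × Int × String)) : Option (Int × Int) :=
  (l.find? (fun c => c.2.2 == "E")).map (fun c => (c.1, c.2.1))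

theorem foldl_flatMap' {α β σ : Type} (g : σ → β → σ) (f : α → List β) :
    ∀ (l : List α) (init : σ),
      (l.flatMap f).foldl g init = l.foldl (fun st a => (f a).foldl g st) init := by
  intro l
  induction l with
  | nil => intro init; rfl
  | cons a l ih => intro init; simp [List.flatMap_cons, List.foldl_append, ih]

theorem foldB_char : ∀ (l : List (Int × Int × String)) (st : (Option (Int × Int)) × (Option (Int × Int))),
    l.foldl stepB' st = (st.1.or (fS l), st.2.or (fE l)) := by
  intro l
  induction l with
  | nil => intro st; simp [fS, fE]
  | cons c l ih =>
    intro st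
    simp only [List.foldl_cons, ih, fS, fE, List.find?_cons]
    obtain ⟨r, c', v⟩ := c
    obtain ⟨b, e⟩ := st
    simp only [stepB', stepB]
    cases b <;> cases e <;> cases hs : v == "S" <;> cases he : v == "E" <;>
      simp_all [Option.or, beq_iff_eq]
theorem foldA_char : ∀ (l : List (Int × Int × String)) (st : (Option (Int × Int)) × (Option (Int × Int))),
    l.foldl stepA' st = ((fS l.reverse).or st.1, (fE l.reverse).or st.2) := by
  intro l
  induction l with
  | nil => intro st; simp [fS, fE]
  | cons c l ih =>
    intro st
    simp only [List.foldl_cons, ih, fS, fE, List.reverse_cons, List.find?_append]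
    obtain ⟨r, c', v⟩ := c
    obtain ⟨b, e⟩ := st
    simp only [stepA', stepA, List.find?_cons]
    cases hf : (l.reverse.find? (fun c => c.2.2 == "S")) <;>
    cases hg : (l.reverse.find? (fun c => c.2.2 == "E")) <;>
    cases hs : v == "S" <;> cases he : v == "E" <;>
      simp_all [Option.or, beq_iff_eq]

theorem A_cells (maze : List (List String)) :
    get_maze_beginning_and_end maze = (cells maze).foldl stepA' (none, none) := by
  unfold get_maze_beginning_and_end cells
  rw [foldl_flatMap']
  simp [List.foldl_map, stepA']

-- the early return is only taken with both components some; then stepB is the identity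
theorem stepB_fix (row col : Int) (v : String) (b e : Int × Int) :
    stepB row col v (some b, some e) = (some b, some e) := by simp [stepB]

theorem foldB_fix (b e : Int × Int) (l : List (Int × Int × String)) :
    l.foldl stepB' (some b, some e) = (some b, some e) := by
  induction l with
  | nil => rfl
  | cons c l ih => simpa [stepB', stepB_fix] using ih

theorem bCols_eq (row : Int) : ∀ (l : List (String × Nat)) (st : (Option (Int × Int)) × (Option (Int × Int))),
    (bCols row l st).1 = (l.map (fun cv => (row, (cv.2 : Int), cv.1))).foldl stepB' st ∧
    ((bCols row l st).2 = true → ∃ b e, (bCols row l st).1 = (some b, some e)) := by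
  intro l
  induction l with
  | nil => intro st; simp [bCols]
  | cons cv l ih =>
    intro st
    rcases hst : stepB row (cv.2 : Int) cv.1 st with ⟨b', e'⟩
    have hstep : stepB' st (row, (cv.2 : Int), cv.1) = (b', e') := hst
    simp only [bCols, hst, List.map_cons, List.foldl_cons, hstep]
    by_cases h : b' ≠ none ∧ e' ≠ none
    · obtain ⟨h1, h2⟩ := h
      obtain ⟨b, hb⟩ := Option.ne_none_iff_exists'.mp h1
      obtain ⟨e, he⟩ := Option.ne_none_iff_exists'.mp h2
      subst hb; subst he
      simp [foldB_fix]
    · have h' : ¬ ((b', e').1 ≠ none ∧ (b', e').2 ≠ none) := h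
      simp only [if_neg h']
      exact ih (b', e')
theorem bRows_eq : ∀ (l : List (List String × Nat)) (st : (Option (Int × Int)) × (Option (Int × Int))),
    bRows l st =
      (l.flatMap (fun rr => rr.1.zipIdx.reverse.map (fun cv => ((rr.2 : Int), (cv.2 : Int), cv.1)))).foldl
        stepB' st := by
  intro l
  induction l with
  | nil => intro st; rfl
  | cons rr l ih =>
    intro st
    unfold bRows
    obtain ⟨hval, hdone⟩ := bCols_eq (rr.2 : Int) rr.1.zipIdx.reverse st
    by_cases h : (bCols (rr.2 : Int) rr.1.zipIdx.reverse st).2 = true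
    · obtain ⟨b, e, hbe⟩ := hdone h
      simp only [h, if_true, List.flatMap_cons, List.foldl_append, ← hval, hbe, foldB_fix]
    · simp only [Bool.not_eq_true] at h
      simp only [h, Bool.false_eq_true, if_false, List.flatMap_cons, List.foldl_append, ← hval, ih]

theorem B_cells (maze : List (List String)) :
    get_maze_beginning_and_end_alt maze = (cells maze).reverse.foldl stepB' (none, none) := by
  unfold get_maze_beginning_and_end_alt cells
  rw [bRows_eq]
  congr 1
  rw [List.reverse_flatMap]
  simp [List.flatMap_def, List.map_reverse, Function.comp_def]

-- ===== VERDICT (by name: the statement is the Claim_ definition above) =====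
theorem get_maze_beginning_and_end_spec : Claim_equal_get_maze_beginning_and_end := by
  intro maze _
  show get_maze_beginning_and_end maze = get_maze_beginning_and_end_alt maze
  rw [A_cells, B_cells, foldA_char, foldB_char]
  simp
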